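-- pv_equiv track=rewrite | github.com/yuchanns/ltask-go | .github/scripts/examples/plan.py | calculate_final_examples
-- ===== SOURCE A (Python) =====
-- def calculate_final_examples(changed_files: list[str], all_examples: list[str]) -> list[str]:
--     # Ignore markdown files
--     changed_files = [f for f in changed_files if not f.endswith(".md")]
--
--     changed_examples = set()
--
--     for file_path in changed_files:
--         if file_path.startswith("examples/"):
--             # run only the changed example
--             path_parts = file_path.split("/")
--             if len(path_parts) >= 2:
--                 example_name = path_parts[1]
--                 if example_name in all_examples:
--                     changed_examples.add(example_name)
--         else:
--             # If a non-example file is changed, run all examples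
--             return all_examples
--
--
--     return sorted(list(changed_examples))
-- ===== SOURCE B (Python) =====
-- def calculate_final_examples(changed_files: list[str], all_examples: list[str]) -> list[str]:
--     relevant = [f for f in changed_files if not f.endswith(".md")]
--     if not all(f.startswith("examples/") for f in relevant):
--         return all_examples
--
--     def touched(e):
--         return any(len(parts) >= 2 and parts[1] == e
--                    for parts in (f.split("/") for f in relevant))
--
--     return sorted({e for e in all_examples if touched(e)})
-- ===== Notes on version B (the rewrite author's own statement) =====
-- stated objective: alternative
-- what changed: Inverts the traversal: instead of scanning the changed files and collecting path parts into a result set, B iterates over the candidate example names and keeps each name that some changed file touches (an any-scan over the files per candidate), after an all() pre-check for non-example files.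
import Mathlib
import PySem

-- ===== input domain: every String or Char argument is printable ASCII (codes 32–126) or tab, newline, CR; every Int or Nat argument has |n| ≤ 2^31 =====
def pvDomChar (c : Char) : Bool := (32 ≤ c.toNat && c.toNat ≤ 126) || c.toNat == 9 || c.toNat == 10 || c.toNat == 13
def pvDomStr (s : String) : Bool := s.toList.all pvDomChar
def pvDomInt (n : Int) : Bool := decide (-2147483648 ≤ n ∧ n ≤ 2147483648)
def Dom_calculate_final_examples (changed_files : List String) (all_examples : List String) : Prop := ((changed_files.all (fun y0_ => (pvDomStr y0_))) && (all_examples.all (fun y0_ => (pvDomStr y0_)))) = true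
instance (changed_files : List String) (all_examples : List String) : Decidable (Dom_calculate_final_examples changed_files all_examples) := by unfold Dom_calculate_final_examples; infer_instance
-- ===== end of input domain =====

-- B inverts the traversal: it iterates over the candidate example names and keeps each one that some
-- changed file touches, instead of scanning the files and collecting names into a set; objective: alternative.

-- ===== PORT A =====
-- path_parts = f.split("/"): "/" is a nonempty separator, so split? is always `some`; getD [] only discharges the Option
def pvParts (f : String) : List String := (PySem.Str.split? f "/").getD []

-- A's for-loop over the filtered files, with the early return on a non-"examples/" file.
def pvALoop (all_examples : List String) (acc : PySem.Set String) : List String → List String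
  | [] => PySem.List.sorted acc (fun x => x) false
  | f :: rest =>
    if PySem.Str.startswith f "examples/" then
      if 2 ≤ (pvParts f).length then                      -- len(path_parts) >= 2
        if all_examples.contains ((pvParts f).getD 1 "") then   -- example_name = path_parts[1]
          pvALoop all_examples (PySem.Set.add acc ((pvParts f).getD 1 "")) rest
        else pvALoop all_examples acc rest
      else pvALoop all_examples acc rest
    else all_examples

def calculate_final_examples (changed_files : List String) (all_examples : List String) : List String :=
  pvALoop all_examples PySem.Set.empty
    (changed_files.filter (fun f => !PySem.Str.endswith f ".md"))

-- ===== PORT B =====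
-- touched(e): some relevant file has e as its second path component
def pvTouched (relevant : List String) (e : String) : Bool :=
  relevant.any (fun f => 2 ≤ (pvParts f).length && ((pvParts f).getD 1 "" == e))

def calculate_final_examples_alt (changed_files : List String) (all_examples : List String) : List String :=
  let relevant := changed_files.filter (fun f => !PySem.Str.endswith f ".md")
  if relevant.all (fun f => PySem.Str.startswith f "examples/") then
    PySem.List.sorted (PySem.Set.ofList (all_examples.filter (pvTouched relevant))) (fun x => x) false
  else all_examples

-- ===== PRECONDITION & SPEC =====
def Spec_calculate_final_examples (changed_files : List String) (all_examples : List String) (out : List String) : Prop := out = calculate_final_examples_alt changed_files all_examples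
instance (changed_files : List String) (all_examples : List String) (out : List String) : Decidable (Spec_calculate_final_examples changed_files all_examples out) := by unfold Spec_calculate_final_examples; infer_instance

-- ===== CLAIM (what is proved, stated in full; the proofs are below) =====
def Claim_equal_calculate_final_examples : Prop := ∀ (changed_files : List String) (all_examples : List String), Dom_calculate_final_examples changed_files all_examples → Spec_calculate_final_examples changed_files all_examples (calculate_final_examples changed_files all_examples)

-- ===== LEMMAS AND PROOFS =====

-- the example name contributed by one file of A's loop, if any (proof-side view of A's loop body)
def pvGen (all_examples : List String) (f : String) : Option String :=
  if 2 ≤ (pvParts f).length then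
    if all_examples.contains ((pvParts f).getD 1 "") then some ((pvParts f).getD 1 "") else none
  else none

-- if some file in the list does not start with "examples/", A's loop early-returns all_examples
theorem pvALoop_bad (ae : List String) (l : List String)
    (h : ¬ l.all (fun f => PySem.Str.startswith f "examples/") = true) :
    ∀ acc, pvALoop ae acc l = ae := by
  induction l with
  | nil => simp at h
  | cons f rest ih =>
    intro acc
    simp only [List.all_cons, Bool.and_eq_true, not_and] at h
    by_cases hs : PySem.Str.startswith f "examples/" = true
    · have hrest := h hs
      simp only [pvALoop]
      rw [if_pos hs]
      by_cases hl : 2 ≤ (pvParts f).length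
      · rw [if_pos hl]
        by_cases hc : ae.contains ((pvParts f).getD 1 "") = true
        · rw [if_pos hc]; exact ih hrest _
        · rw [if_neg hc]; exact ih hrest acc
      · rw [if_neg hl]; exact ih hrest acc
    · simp only [pvALoop]
      rw [if_neg hs]

-- if every file starts with "examples/", A's loop is sorted of the set of generated names
theorem pvALoop_good (ae : List String) (l : List String)
    (h : l.all (fun f => PySem.Str.startswith f "examples/") = true) :
    ∀ acc, pvALoop ae acc l =
      PySem.List.sorted ((l.filterMap (pvGen ae)).foldl PySem.Set.add acc) (fun x => x) false := by
  induction l with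
  | nil => intro acc; simp [pvALoop]
  | cons f rest ih =>
    intro acc
    simp only [List.all_cons, Bool.and_eq_true] at h
    obtain ⟨hs, hrest⟩ := h
    simp only [pvALoop]
    rw [if_pos hs, List.filterMap_cons]
    by_cases hl : 2 ≤ (pvParts f).length
    · rw [if_pos hl]
      by_cases hc : ae.contains ((pvParts f).getD 1 "") = true
      · rw [if_pos hc]
        have hgen : pvGen ae f = some ((pvParts f).getD 1 "") := by
          unfold pvGen; rw [if_pos hl, if_pos hc]
        rw [hgen]
        simp only [List.foldl_cons]
        exact ih hrest _
      · rw [if_neg hc]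
        have hgen : pvGen ae f = none := by unfold pvGen; rw [if_pos hl, if_neg hc]
        rw [hgen]
        exact ih hrest acc
    · rw [if_neg hl]
      have hgen : pvGen ae f = none := by unfold pvGen; rw [if_neg hl]
      rw [hgen]
      exact ih hrest acc

-- the two result sets have the same members: a name generated by some file ↔ a candidate some file touches
theorem pvMembers (ae rel : List String) (x : String) :
    x ∈ PySem.Set.ofList (rel.filterMap (pvGen ae)) ↔
      x ∈ PySem.Set.ofList (ae.filter (pvTouched rel)) := by
  rw [PySem.Set.mem_ofList, PySem.Set.mem_ofList, List.mem_filterMap, List.mem_filter]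
  constructor
  · rintro ⟨f, hf, hgen⟩
    unfold pvGen at hgen
    by_cases hl : 2 ≤ (pvParts f).length
    · rw [if_pos hl] at hgen
      by_cases hc : ae.contains ((pvParts f).getD 1 "") = true
      · rw [if_pos hc] at hgen
        obtain rfl : (pvParts f).getD 1 "" = x := Option.some.inj hgen
        refine ⟨by simpa using hc, ?_⟩
        unfold pvTouched
        rw [List.any_eq_true]
        exact ⟨f, hf, by simp [hl]⟩
      · rw [if_neg hc] at hgen; exact absurd hgen (by simp)
    · rw [if_neg hl] at hgen; exact absurd hgen (by simp)
  · rintro ⟨hx, ht⟩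
    unfold pvTouched at ht
    rw [List.any_eq_true] at ht
    obtain ⟨f, hf, hcond⟩ := ht
    simp only [Bool.and_eq_true, decide_eq_true_eq, beq_iff_eq] at hcond
    obtain ⟨hl, hname⟩ := hcond
    refine ⟨f, hf, ?_⟩
    unfold pvGen
    rw [if_pos hl, hname, if_pos (by simpa using hx)]

theorem calculate_final_examples_eq (changed_files : List String) (all_examples : List String) :
    calculate_final_examples changed_files all_examples
      = calculate_final_examples_alt changed_files all_examples := by
  unfold calculate_final_examples calculate_final_examples_alt
  set rel := changed_files.filter (fun f => !PySem.Str.endswith f ".md") with hrel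
  by_cases hb : rel.all (fun f => PySem.Str.startswith f "examples/") = true
  · rw [pvALoop_good all_examples rel hb, if_pos hb,
      show (PySem.Set.empty : PySem.Set String) = [] from rfl, ← PySem.Set.ofList_eq_foldl]
    apply PySem.List.sorted_eq_sorted_of_perm _ _ _ (fun a b h => h)
    exact (List.perm_ext_iff_of_nodup (PySem.Set.nodup_ofList _) (PySem.Set.nodup_ofList _)).mpr
      (pvMembers all_examples rel)
  · rw [pvALoop_bad all_examples rel hb, if_neg hb]

-- ===== VERDICT (by name: the statement is the Claim_ definition above) =====
theorem calculate_final_examples_spec : Claim_equal_calculate_final_examples := by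
  intro cf ae _
  unfold Spec_calculate_final_examples
  exact calculate_final_examples_eq cf ae
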